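-- pv_equiv track=rewrite | github.com/msbmteam/NiceFriedman6 | nice_friedman_solver.py | parenthesized
-- ===== SOURCE A (Python) =====
-- def parenthesized(exprs):
--     if len(exprs) == 1:
--         yield f'{exprs[0]}.'
--     else:
--         first_exprs = []
--         last_exprs = list(exprs)
--         while 1 < len(last_exprs):
--             first_exprs.append(last_exprs.pop(0))
--             for x in parenthesized(first_exprs):
--                 if 1 < len(first_exprs):
--                     x = f'({x})'
--                 for y in parenthesized(last_exprs):
--                     if 1 < len(last_exprs):
--                         y = f'({y})'
--                     for op in [' + ', ' - ', ' * ', ' / ', ' ** ']: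
--                         yield f'{x}{op}{y}'
-- ===== SOURCE B (Python) =====
-- def _combine(wl, wr, L, R):
--     out = []
--     for x in L:
--         if wl:
--             x = f'({x})'
--         for y in R:
--             if wr:
--                 y = f'({y})'
--             for op in [' + ', ' - ', ' * ', ' / ', ' ** ']:
--                 out.append(f'{x}{op}{y}')
--     return out
--
--
-- def parenthesized(exprs):
--     n = len(exprs)
--     if n == 0:
--         return
--     # bottom-up interval DP: P[i][j] = all parenthesizations of exprs[i:j]
--     P = [[[] for _ in range(n + 1)] for _ in range(n + 1)]
--     for i in range(n):
--         P[i][i + 1] = [f'{exprs[i]}.']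
--     for length in range(2, n + 1):
--         for i in range(n - length + 1):
--             j = i + length
--             acc = []
--             for k in range(i + 1, j):
--                 acc += _combine(1 < k - i, 1 < j - k, P[i][k], P[k][j])
--             P[i][j] = acc
--     yield from P[0][n]
-- ===== Notes on version B (the rewrite author's own statement) =====
-- stated objective: alternative
-- what changed: Replaced A's mutually re-entrant recursive generator (which re-enumerates the right part's parenthesizations for every left result) by an iterative bottom-up interval-DP table P[i][j] filled by increasing interval length, yielding P[0][n].
import Mathlib
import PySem

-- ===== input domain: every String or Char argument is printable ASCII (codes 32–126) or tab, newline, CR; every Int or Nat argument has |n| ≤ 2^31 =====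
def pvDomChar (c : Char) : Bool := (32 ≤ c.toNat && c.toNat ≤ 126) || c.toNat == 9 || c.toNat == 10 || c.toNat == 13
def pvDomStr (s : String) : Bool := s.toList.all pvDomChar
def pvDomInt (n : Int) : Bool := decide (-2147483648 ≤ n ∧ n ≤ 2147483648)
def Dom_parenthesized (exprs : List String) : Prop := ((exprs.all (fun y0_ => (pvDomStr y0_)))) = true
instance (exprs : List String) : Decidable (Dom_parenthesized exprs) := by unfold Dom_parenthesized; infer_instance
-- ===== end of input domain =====

-- B replaces A's recursive generator (A re-enumerates each suffix's parenthesizations once per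
-- prefix result) by a bottom-up interval-DP table computing each interval once; objective: alternative.

-- the operator list and the shared inner triple loop ('for x … for y … for op …'),
-- which appears verbatim in both Pythons (inline in A, as _combine in B)
def pvOps : List String := [" + ", " - ", " * ", " / ", " ** "]

def pvCombine (wl wr : Bool) (L R : List String) : List String :=
  L.flatMap (fun x =>
    let x := if wl then "(" ++ x ++ ")" else x
    R.flatMap (fun y =>
      let y := if wr then "(" ++ y ++ ")" else y
      pvOps.map (fun op => x ++ op ++ y)))

-- ===== PORT A =====
mutual
  -- the generator, as the list of its yields
  def parenthesized (exprs : List String) : List String :=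
    if exprs.length = 1 then [exprs.headD "" ++ "."]
    else pvParenLoop [] exprs
  termination_by (exprs.length, exprs.length + 1)
  decreasing_by simp [Prod.lex_def]

  -- the 'while 1 < len(last_exprs)' loop: state = (first_exprs, last_exprs)
  def pvParenLoop (first last : List String) : List String :=
    match last with
    | [] => []
    | [_] => []
    | z :: r :: rs =>
      let rest := r :: rs
      let first' := first ++ [z]
      pvCombine (decide (1 < first'.length)) (decide (1 < rest.length))
        (parenthesized first') (parenthesized rest)
      ++ pvParenLoop first' rest
  termination_by (first.length + last.length, last.length)
  decreasing_by
    all_goals simp [Prod.lex_def] <;> omega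
end

-- ===== PORT B =====
def parenthesized_alt (exprs : List String) : List String :=
  let n := exprs.length
  if n = 0 then []
  else
    -- P[i][j] will hold all parenthesizations of exprs[i:j]
    let P0 : List (List (List String)) :=
      List.replicate (n + 1) (List.replicate (n + 1) ([] : List String))
    let P1 := (List.range n).foldl
      (fun P i => P.set i ((P.getD i []).set (i + 1) [exprs.getD i "" ++ "."])) P0
    let P2 := (List.range' 2 (n - 1)).foldl (fun P len =>
      (List.range (n - len + 1)).foldl (fun P i =>
        let j := i + len
        let acc := (List.range' (i + 1) (len - 1)).foldl (fun acc k =>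
          acc ++ pvCombine (decide (1 < k - i)) (decide (1 < j - k))
                  ((P.getD i []).getD k []) ((P.getD k []).getD j [])) []
        P.set i ((P.getD i []).set j acc)) P) P1
    (P2.getD 0 []).getD n []

-- ===== PRECONDITION & SPEC =====
def Spec_parenthesized (exprs : List String) (out : List String) : Prop := out = parenthesized_alt exprs
instance (exprs : List String) (out : List String) : Decidable (Spec_parenthesized exprs out) := by unfold Spec_parenthesized; infer_instance

-- ===== CLAIM (what is proved, stated in full; the proofs are below) =====
def Claim_equal_parenthesized : Prop := ∀ (exprs : List String), Dom_parenthesized exprs → Spec_parenthesized exprs (parenthesized exprs)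

-- ===== LEMMAS AND PROOFS =====

theorem range'_shift (n s t : Nat) :
    List.range' (s + t) n = (List.range' s n).map (· + t) := by
  induction n generalizing s with
  | zero => simp
  | succ n ih =>
    rw [List.range'_succ, List.range'_succ, List.map_cons,
      show s + t + 1 = s + 1 + t by omega, ih (s+1)]

theorem pvParenLoop_eq (last first : List String) :
    pvParenLoop first last =
      (List.range' 1 (last.length - 1)).flatMap (fun k =>
        pvCombine (decide (1 < first.length + k)) (decide (1 < last.length - k))
          (parenthesized (first ++ last.take k)) (parenthesized (last.drop k))) := by
  induction last generalizing first with
  | nil => simp [pvParenLoop]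
  | cons z rest ih =>
    cases rest with
    | nil => simp [pvParenLoop]
    | cons r rs =>
      rw [pvParenLoop]
      rw [show (z :: r :: rs).length - 1 = rs.length + 1 from rfl, List.range'_succ,
        List.flatMap_cons]
      congr 1
      · simp
      · rw [ih (first ++ [z]), range'_shift rs.length 1 1, List.flatMap_map]
        simp only [List.length_cons, Nat.add_sub_cancel]
        congr 1
        funext k
        simp only [List.length_append, List.length_cons,
          List.take_succ_cons, List.drop_succ_cons, List.append_assoc,
          List.cons_append, List.nil_append, List.length_nil]
        congr 2 <;> first | rfl | (rw [eq_iff_iff]; omega)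

theorem parenthesized_split (exprs : List String) (h : exprs.length ≠ 1) :
    parenthesized exprs =
      (List.range' 1 (exprs.length - 1)).flatMap (fun k =>
        pvCombine (decide (1 < k)) (decide (1 < exprs.length - k))
          (parenthesized (exprs.take k)) (parenthesized (exprs.drop k))) := by
  rw [parenthesized, if_neg h, pvParenLoop_eq]
  simp

theorem getD_set_self {α : Type} {l : List α} {i : Nat} (a d : α) (h : i < l.length) :
    (l.set i a).getD i d = a := by
  simp [List.getD_eq_getElem?_getD, List.getElem?_set_self, h]

theorem getD_set_ne {α : Type} {l : List α} {i j : Nat} (a d : α) (h : i ≠ j) :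
    (l.set i a).getD j d = l.getD j d := by
  simp [List.getD_eq_getElem?_getD, List.getElem?_set_ne, h]

theorem getD_replicate {α : Type} {m i : Nat} (d r : α) (h : i < m) :
    (List.replicate m r).getD i d = r := by
  simp [List.getD_eq_getElem?_getD, List.getElem?_replicate, h]

theorem parenthesized_singleton (x : String) : parenthesized [x] = [x ++ "."] := by
  rw [parenthesized]; rfl

theorem sub_take (exprs : List String) (i : Nat) (h : i < exprs.length) :
    (exprs.drop i).take 1 = [exprs.getD i ""] := by
  rw [List.drop_eq_getElem_cons h, List.take_succ_cons, List.take_zero,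
    List.getD_eq_getElem _ _ h]

def GoodTable (exprs : List String) (L : Nat) (P : List (List (List String))) : Prop :=
  P.length = exprs.length + 1 ∧
  (∀ i, i ≤ exprs.length → (P.getD i []).length = exprs.length + 1) ∧
  (∀ i j, i < j → j ≤ exprs.length → j - i ≤ L →
    (P.getD i []).getD j [] = parenthesized ((exprs.drop i).take (j - i)))

theorem acc_eq (exprs : List String) (P : List (List (List String))) (len i : Nat)
    (hlen : 2 ≤ len) (hi : i + len ≤ exprs.length)
    (hP : GoodTable exprs (len - 1) P) :
    (List.range' (i + 1) (len - 1)).foldl (fun acc k =>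
      acc ++ pvCombine (decide (1 < k - i)) (decide (1 < i + len - k))
        ((P.getD i []).getD k []) ((P.getD k []).getD (i + len) [])) [] =
    parenthesized ((exprs.drop i).take len) := by
  rw [PySem.List.foldl_append_eq_flatMap, List.nil_append]
  have hl : ((exprs.drop i).take len).length = len := by simp; omega
  rw [parenthesized_split _ (by omega), hl]
  rw [show i + 1 = 1 + i by omega, range'_shift (len - 1) 1 i, List.flatMap_map]
  apply List.flatMap_congr
  intro k hk
  have hb : 1 ≤ k ∧ k < 1 + (len - 1) := by
    rw [List.mem_range'] at hk
    obtain ⟨m, hm, rfl⟩ := hk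
    omega
  obtain ⟨-, -, hP3⟩ := hP
  have e1 : (P.getD i []).getD (k + i) [] = parenthesized ((exprs.drop i).take k) := by
    rw [hP3 i (k + i) (by omega) (by omega) (by omega)]
    congr 2
    omega
  have e2 : (P.getD (k + i) []).getD (i + len) [] =
      parenthesized ((exprs.drop (k + i)).take (len - k)) := by
    rw [hP3 (k + i) (i + len) (by omega) (by omega) (by omega)]
    congr 2
    omega
  rw [e1, e2]
  congr 2
  · rw [eq_iff_iff]; omega
  · rw [eq_iff_iff]; omega
  · rw [List.take_take]
    congr 1
    omega
  · rw [List.drop_take, List.drop_drop]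
    congr 2 <;> omega

theorem base_aux (exprs : List String) (m : Nat) (hm : m ≤ exprs.length) :
    (((List.range m).foldl
      (fun P i => P.set i ((P.getD i []).set (i + 1) [exprs.getD i "" ++ "."]))
      (List.replicate (exprs.length + 1) (List.replicate (exprs.length + 1) ([] : List String)))).length
        = exprs.length + 1) ∧
    (∀ i, i ≤ exprs.length → (((List.range m).foldl
      (fun P i => P.set i ((P.getD i []).set (i + 1) [exprs.getD i "" ++ "."]))
      (List.replicate (exprs.length + 1) (List.replicate (exprs.length + 1) ([] : List String)))).getD i []).length
        = exprs.length + 1) ∧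
    (∀ i, i < m → (((List.range m).foldl
      (fun P i => P.set i ((P.getD i []).set (i + 1) [exprs.getD i "" ++ "."]))
      (List.replicate (exprs.length + 1) (List.replicate (exprs.length + 1) ([] : List String)))).getD i []).getD (i + 1) []
        = [exprs.getD i "" ++ "."]) := by
  induction m with
  | zero =>
    refine ⟨by simp, fun i hi => ?_, by omega⟩
    simp only [List.range_zero, List.foldl_nil]
    rw [getD_replicate _ _ (by omega)]
    simp
  | succ m ih =>
    obtain ⟨h1, h2, h3⟩ := ih (by omega)
    rw [List.range_succ, List.foldl_append, List.foldl_cons, List.foldl_nil]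
    refine ⟨by simpa using h1, fun i hi => ?_, fun i hi => ?_⟩
    · by_cases him : i = m
      · subst him
        rw [getD_set_self _ _ (by omega)]
        simpa using h2 i (by omega)
      · rw [getD_set_ne _ _ (Ne.symm him)]
        exact h2 i hi
    · by_cases him : i = m
      · subst him
        rw [getD_set_self _ _ (by omega), getD_set_self _ _ (by rw [h2 i (by omega)]; omega)]
      · rw [getD_set_ne _ _ (Ne.symm him)]
        exact h3 i (by omega)

theorem base_good (exprs : List String) :
    GoodTable exprs 1 ((List.range exprs.length).foldl
      (fun P i => P.set i ((P.getD i []).set (i + 1) [exprs.getD i "" ++ "."]))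
      (List.replicate (exprs.length + 1) (List.replicate (exprs.length + 1) ([] : List String)))) := by
  obtain ⟨h1, h2, h3⟩ := base_aux exprs exprs.length le_rfl
  refine ⟨h1, h2, fun i j hij hj hgap => ?_⟩
  have hj1 : j = i + 1 := by omega
  subst hj1
  rw [h3 i (by omega), show i + 1 - i = 1 by omega, sub_take exprs i (by omega),
    parenthesized_singleton]

theorem fold_i_aux (exprs : List String) (len : Nat) (hlen : 2 ≤ len) (hn : len ≤ exprs.length)
    (m : Nat) (hm : m ≤ exprs.length - len + 1) (P : List (List (List String)))
    (hP : GoodTable exprs (len - 1) P) :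
    GoodTable exprs (len - 1) ((List.range m).foldl
      (fun P i => P.set i ((P.getD i []).set (i + len)
        ((List.range' (i + 1) (len - 1)).foldl (fun acc k =>
          acc ++ pvCombine (decide (1 < k - i)) (decide (1 < i + len - k))
            ((P.getD i []).getD k []) ((P.getD k []).getD (i + len) [])) []))) P) ∧
    (∀ i, i < m → ((((List.range m).foldl
      (fun P i => P.set i ((P.getD i []).set (i + len)
        ((List.range' (i + 1) (len - 1)).foldl (fun acc k =>
          acc ++ pvCombine (decide (1 < k - i)) (decide (1 < i + len - k))
            ((P.getD i []).getD k []) ((P.getD k []).getD (i + len) [])) []))) P).getD i []).getD (i + len) [])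
        = parenthesized ((exprs.drop i).take len)) := by
  induction m with
  | zero => exact ⟨by simpa using hP, by omega⟩
  | succ m ih =>
    obtain ⟨⟨g1, g2, g3⟩, hfill⟩ := ih (by omega)
    rw [List.range_succ, List.foldl_append, List.foldl_cons, List.foldl_nil]
    have hrowm : m < exprs.length + 1 := by omega
    have hmn : m + len ≤ exprs.length := by omega
    constructor
    · refine ⟨by simpa using g1, fun i hi => ?_, fun i j hij hj hgap => ?_⟩
      · by_cases him : i = m
        · subst him
          rw [getD_set_self _ _ (by omega)]
          simpa using g2 i (by omega)
        · rw [getD_set_ne _ _ (Ne.symm him)]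
          exact g2 i hi
      · by_cases him : i = m
        · subst him
          rw [getD_set_self _ _ (by omega), getD_set_ne _ _ (by omega)]
          exact g3 i j hij hj hgap
        · rw [getD_set_ne _ _ (Ne.symm him)]
          exact g3 i j hij hj hgap
    · intro i hi
      by_cases him : i = m
      · subst him
        rw [getD_set_self _ _ (by omega), getD_set_self _ _ (by rw [g2 i (by omega)]; omega)]
        exact acc_eq exprs _ len i hlen (by omega) ⟨g1, g2, g3⟩
      · rw [getD_set_ne _ _ (Ne.symm him)]
        exact hfill i (by omega)

theorem fold_i_good (exprs : List String) (len : Nat) (hlen : 2 ≤ len) (hn : len ≤ exprs.length)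
    (P : List (List (List String))) (hP : GoodTable exprs (len - 1) P) :
    GoodTable exprs len ((List.range (exprs.length - len + 1)).foldl
      (fun P i => P.set i ((P.getD i []).set (i + len)
        ((List.range' (i + 1) (len - 1)).foldl (fun acc k =>
          acc ++ pvCombine (decide (1 < k - i)) (decide (1 < i + len - k))
            ((P.getD i []).getD k []) ((P.getD k []).getD (i + len) [])) []))) P) := by
  obtain ⟨⟨g1, g2, g3⟩, hfill⟩ := fold_i_aux exprs len hlen hn _ le_rfl P hP
  refine ⟨g1, g2, fun i j hij hj hgap => ?_⟩
  by_cases hc : j - i ≤ len - 1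
  · exact g3 i j hij hj hc
  · have hj' : j = i + len := by omega
    subst hj'
    rw [show i + len - i = len by omega]
    exact hfill i (by omega)

theorem outer_aux (exprs : List String) (h1 : 1 ≤ exprs.length)
    (m : Nat) (hm : m ≤ exprs.length - 1) (P : List (List (List String)))
    (hP : GoodTable exprs 1 P) :
    GoodTable exprs (m + 1) ((List.range' 2 m).foldl
      (fun P len => (List.range (exprs.length - len + 1)).foldl
        (fun P i => P.set i ((P.getD i []).set (i + len)
          ((List.range' (i + 1) (len - 1)).foldl (fun acc k =>
            acc ++ pvCombine (decide (1 < k - i)) (decide (1 < i + len - k))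
              ((P.getD i []).getD k []) ((P.getD k []).getD (i + len) [])) []))) P) P) := by
  induction m with
  | zero => simpa using hP
  | succ m ih =>
    rw [List.range'_concat, List.foldl_append, List.foldl_cons, List.foldl_nil]
    simp only [Nat.one_mul]
    have h := fold_i_good exprs (2 + m) (by omega) (by omega) _
      (by rw [show 2 + m - 1 = m + 1 by omega]; exact ih (by omega))
    rw [show m + 1 + 1 = 2 + m by omega]
    exact h

theorem alt_eq (exprs : List String) : parenthesized_alt exprs = parenthesized exprs := by
  by_cases h0 : exprs.length = 0
  · rw [List.length_eq_zero_iff] at h0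
    subst h0
    simp [parenthesized_alt, parenthesized, pvParenLoop]
  · unfold parenthesized_alt
    simp only [if_neg h0]
    have hg := outer_aux exprs (by omega) (exprs.length - 1) le_rfl _ (base_good exprs)
    rw [hg.2.2 0 exprs.length (by omega) le_rfl (by omega)]
    simp

-- ===== VERDICT (by name: the statement is the Claim_ definition above) =====
theorem parenthesized_spec : Claim_equal_parenthesized := by
  intro exprs _
  unfold Spec_parenthesized
  exact (alt_eq exprs).symm
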